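-- pv_equiv track=rewrite | github.com/cristhianleonli/ProblemSolving | hackerrank/queens_attack.py | find_diagonal
-- ===== SOURCE A (Python) =====
-- def find_diagonal(queen, obstacles, size, pos):
--     positions = []
--
--     if pos == 'tr':
--         i, j = queen[0] - 1, queen[1] + 1
--         while i >= 0 and j < size:
--             p = [i, j]
--             if p in obstacles:
--                 break
--             positions.append(p)
--             i, j = i - 1, j + 1
--     elif pos == 'tl':
--         i, j = queen[0] - 1, queen[1] - 1
--         while i >= 0 and j >= 0:
--             p = [i, j]
--             if p in obstacles:
--                 break
--             positions.append(p)
--             i, j = i - 1, j - 1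
--     elif pos == 'br':
--         i, j = queen[0] + 1, queen[1] + 1
--         while i < size and j < size:
--             p = [i, j]
--             if p in obstacles:
--                 break
--             positions.append(p)
--             i, j = i + 1, j + 1
--     elif pos == 'bl':
--         i, j = queen[0] + 1, queen[1] - 1
--         while i < size and j >= 0:
--             p = [i, j]
--             if p in obstacles:
--                 break
--             positions.append(p)
--             i, j = i + 1, j - 1
--
--     return len(positions)
-- ===== SOURCE B (Python) =====
-- def find_diagonal(queen, obstacles, size, pos):
--     dirs = {'tr': (-1, 1), 'tl': (-1, -1), 'br': (1, 1), 'bl': (1, -1)}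
--     if pos not in dirs:
--         return 0
--     di, dj = dirs[pos]
--     q0, q1 = queen[0], queen[1]
--     edge_i = q0 if di == -1 else size - 1 - q0
--     edge_j = q1 if dj == -1 else size - 1 - q1
--     best = max(0, min(edge_i, edge_j))
--     for o in obstacles:
--         if len(o) != 2:
--             continue
--         a, b = o
--         d = (a - q0) * di
--         if d > 0 and d == (b - q1) * dj:
--             best = min(best, d - 1)
--     return best
-- ===== Notes on version B (the rewrite author's own statement) =====
-- stated objective: alternative
-- what changed: Replaces A's square-by-square walk along the diagonal (with an obstacle-membership test at every square) by a closed-form distance to the board edge plus a single scan of the obstacle list for the nearest obstacle on the ray.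
-- outside the precondition, e.g. on find_diagonal([], [], 8, 'tr'): A raises IndexError, B raises IndexError
import Mathlib
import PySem

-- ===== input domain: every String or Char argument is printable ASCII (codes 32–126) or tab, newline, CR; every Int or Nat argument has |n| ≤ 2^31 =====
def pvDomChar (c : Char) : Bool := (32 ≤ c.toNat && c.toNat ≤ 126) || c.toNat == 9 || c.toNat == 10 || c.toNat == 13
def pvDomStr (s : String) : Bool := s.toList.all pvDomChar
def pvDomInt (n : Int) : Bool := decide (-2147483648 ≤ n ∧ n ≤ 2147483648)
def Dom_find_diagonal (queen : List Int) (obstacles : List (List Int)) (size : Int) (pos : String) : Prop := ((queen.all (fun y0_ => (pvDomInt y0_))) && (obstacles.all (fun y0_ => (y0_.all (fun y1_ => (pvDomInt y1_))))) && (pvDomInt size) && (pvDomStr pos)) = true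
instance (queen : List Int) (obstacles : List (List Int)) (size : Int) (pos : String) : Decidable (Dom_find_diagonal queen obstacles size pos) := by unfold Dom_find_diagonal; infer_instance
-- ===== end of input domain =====

-- B replaces A's square-by-square diagonal walk by a closed-form edge distance plus one
-- scan of the obstacle list for the nearest obstacle on the ray (objective: alternative).

-- ===== PORT A =====
-- the four while-loops of A, one helper each; `positions` is the accumulated list
def pvLoopTR (obstacles : List (List Int)) (size i j : Int) (positions : List (List Int)) : List (List Int) :=
  if _h : 0 ≤ i ∧ j < size then
    if [i, j] ∈ obstacles then positions
    else pvLoopTR obstacles size (i - 1) (j + 1) (positions ++ [[i, j]])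
  else positions
termination_by (i + 1).toNat
decreasing_by omega

def pvLoopTL (obstacles : List (List Int)) (i j : Int) (positions : List (List Int)) : List (List Int) :=
  if _h : 0 ≤ i ∧ 0 ≤ j then
    if [i, j] ∈ obstacles then positions
    else pvLoopTL obstacles (i - 1) (j - 1) (positions ++ [[i, j]])
  else positions
termination_by (i + 1).toNat
decreasing_by omega

def pvLoopBR (obstacles : List (List Int)) (size i j : Int) (positions : List (List Int)) : List (List Int) :=
  if _h : i < size ∧ j < size then
    if [i, j] ∈ obstacles then positions
    else pvLoopBR obstacles size (i + 1) (j + 1) (positions ++ [[i, j]])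
  else positions
termination_by (size - i).toNat
decreasing_by omega

def pvLoopBL (obstacles : List (List Int)) (size i j : Int) (positions : List (List Int)) : List (List Int) :=
  if _h : i < size ∧ 0 ≤ j then
    if [i, j] ∈ obstacles then positions
    else pvLoopBL obstacles size (i + 1) (j - 1) (positions ++ [[i, j]])
  else positions
termination_by (size - i).toNat
decreasing_by omega

def find_diagonal (queen : List Int) (obstacles : List (List Int)) (size : Int) (pos : String) : Int :=
  let q0 := PySem.List.pyGetD queen 0 0   -- queen[0]; Pre_ guarantees the index is in range
  let q1 := PySem.List.pyGetD queen 1 0   -- queen[1]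
  let positions : List (List Int) :=
    if pos == "tr" then pvLoopTR obstacles size (q0 - 1) (q1 + 1) []
    else if pos == "tl" then pvLoopTL obstacles (q0 - 1) (q1 - 1) []
    else if pos == "br" then pvLoopBR obstacles size (q0 + 1) (q1 + 1) []
    else if pos == "bl" then pvLoopBL obstacles size (q0 + 1) (q1 - 1) []
    else []
  (positions.length : Int)

-- ===== PORT B =====
def find_diagonal_alt (queen : List Int) (obstacles : List (List Int)) (size : Int) (pos : String) : Int :=
  let dir : Option (Int × Int) :=
    if pos == "tr" then some (-1, 1)
    else if pos == "tl" then some (-1, -1)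
    else if pos == "br" then some (1, 1)
    else if pos == "bl" then some (1, -1)
    else none
  match dir with
  | none => 0
  | some (di, dj) =>
    let q0 := PySem.List.pyGetD queen 0 0   -- queen[0]; Pre_ guarantees the index is in range
    let q1 := PySem.List.pyGetD queen 1 0   -- queen[1]
    let edgeI := if di = -1 then q0 else size - 1 - q0
    let edgeJ := if dj = -1 then q1 else size - 1 - q1
    obstacles.foldl (fun best o =>
      match o with
      | [a, b] =>
        if 0 < (a - q0) * di ∧ (a - q0) * di = (b - q1) * dj then min best ((a - q0) * di - 1)
        else best
      | _ => best) (max 0 (min edgeI edgeJ))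

-- ===== PRECONDITION & SPEC =====
-- Pre_ excludes exactly the inputs where Python A raises IndexError: a direction code with a queen list shorter than 2.
def Pre_find_diagonal (queen : List Int) (obstacles : List (List Int)) (size : Int) (pos : String) : Prop :=
  (pos = "tr" ∨ pos = "tl" ∨ pos = "br" ∨ pos = "bl") → 2 ≤ queen.length
instance (queen : List Int) (obstacles : List (List Int)) (size : Int) (pos : String) : Decidable (Pre_find_diagonal queen obstacles size pos) := by unfold Pre_find_diagonal; infer_instance

def pvWitness_find_diagonal : List Int × List (List Int) × Int × String := ([3, 2], [[1, 4]], 6, "tr")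

def Spec_find_diagonal (queen : List Int) (obstacles : List (List Int)) (size : Int) (pos : String) (out : Int) : Prop := out = find_diagonal_alt queen obstacles size pos
instance (queen : List Int) (obstacles : List (List Int)) (size : Int) (pos : String) (out : Int) : Decidable (Spec_find_diagonal queen obstacles size pos out) := by unfold Spec_find_diagonal; infer_instance

-- ===== CLAIM (what is proved, stated in full; the proofs are below) =====
def Claim_equal_find_diagonal : Prop := ∀ (queen : List Int) (obstacles : List (List Int)) (size : Int) (pos : String), Dom_find_diagonal queen obstacles size pos → Pre_find_diagonal queen obstacles size pos → Spec_find_diagonal queen obstacles size pos (find_diagonal queen obstacles size pos)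

-- ===== LEMMAS AND PROOFS =====

-- abstract walk count: free squares from step t onward, edge capacity E, obstacle predicate on the step index
def gWalk (inObs : Int → Bool) (E t : Int) : Int :=
  if _h : t ≤ E then (if inObs t then 0 else gWalk inObs E (t + 1) + 1) else 0
termination_by (E + 1 - t).toNat
decreasing_by omega

-- the step distance B's scan extracts from an obstacle, as an Option
def matchD (q0 q1 di dj : Int) (o : List Int) : Option Int :=
  match o with
  | [a, b] => if 0 < (a - q0) * di ∧ (a - q0) * di = (b - q1) * dj then some ((a - q0) * di) else none
  | _ => none

lemma foldMin_le_init (t : Int) (l : List Int) : ∀ init, l.foldl (fun b d => min b (d - t)) init ≤ init := by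
  induction l with
  | nil => intro init; simp
  | cons d l ih =>
    intro init
    calc (d :: l).foldl (fun b d => min b (d - t)) init
        = l.foldl (fun b d => min b (d - t)) (min init (d - t)) := rfl
      _ ≤ min init (d - t) := ih _
      _ ≤ init := min_le_left _ _

lemma foldMin_nonneg (t : Int) (l : List Int) (h : ∀ d ∈ l, t ≤ d) :
    ∀ init, 0 ≤ init → 0 ≤ l.foldl (fun b d => min b (d - t)) init := by
  induction l with
  | nil => intro init h0; simpa using h0
  | cons d l ih =>
    intro init h0
    have hd := h (d) (by simp)
    have : (0:Int) ≤ min init (d - t) := by omega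
    exact ih (fun x hx => h x (by simp [hx])) _ this

lemma foldMin_le_mem (t : Int) (l : List Int) {d0 : Int} (hd : d0 ∈ l) :
    ∀ init, l.foldl (fun b d => min b (d - t)) init ≤ d0 - t := by
  induction l with
  | nil => cases hd
  | cons d l ih =>
    intro init
    rcases List.mem_cons.mp hd with h | h
    · subst h
      calc (d0 :: l).foldl (fun b d => min b (d - t)) init
          = l.foldl (fun b d => min b (d - t)) (min init (d0 - t)) := rfl
        _ ≤ min init (d0 - t) := foldMin_le_init t l _
        _ ≤ d0 - t := min_le_right _ _
    · exact ih h _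

lemma foldMin_shift (t : Int) (l : List Int) :
    ∀ init, l.foldl (fun b d => min b (d - t)) (init + 1)
      = l.foldl (fun b d => min b (d - (t + 1))) init + 1 := by
  induction l with
  | nil => intro init; simp
  | cons d l ih =>
    intro init
    have hmin : min (init + 1) (d - t) = min init (d - (t + 1)) + 1 := by omega
    calc (d :: l).foldl (fun b d => min b (d - t)) (init + 1)
        = l.foldl (fun b d => min b (d - t)) (min (init + 1) (d - t)) := rfl
      _ = l.foldl (fun b d => min b (d - t)) (min init (d - (t + 1)) + 1) := by rw [hmin]
      _ = l.foldl (fun b d => min b (d - (t + 1))) (min init (d - (t + 1))) + 1 := ih _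
      _ = (d :: l).foldl (fun b d => min b (d - (t + 1))) init + 1 := rfl

theorem gWalk_eq (inObs : Int → Bool) (E : Int) (ds : List Int)
    (hpos : ∀ d ∈ ds, 0 < d)
    (hiff : ∀ d, 0 < d → (inObs d = true ↔ d ∈ ds))
    (t : Int) (ht : 1 ≤ t) :
    gWalk inObs E t
      = (ds.filter (fun d => t ≤ d)).foldl (fun b d => min b (d - t)) (max 0 (E - t + 1)) := by
  rw [gWalk]
  by_cases hE : t ≤ E
  · by_cases hobs : inObs t = true
    · simp only [hE, hobs, dite_true, if_true]
      have hmem : t ∈ ds := (hiff t (by omega)).mp hobs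
      have hmemf : t ∈ ds.filter (fun d => t ≤ d) := List.mem_filter.mpr ⟨hmem, by simp⟩
      have h1 := foldMin_le_mem t (ds.filter (fun d => t ≤ d)) hmemf (max 0 (E - t + 1))
      have h2 := foldMin_nonneg t (ds.filter (fun d => t ≤ d))
        (fun d hd => by simpa using (List.mem_filter.mp hd).2) (max 0 (E - t + 1)) (by omega)
      omega
    · simp only [hE, hobs, dite_true, if_false, Bool.false_eq_true]
      have hrec := gWalk_eq inObs E ds hpos hiff (t + 1) (by omega)
      have hnot : t ∉ ds := fun hm => by simp [(hiff t (by omega)).mpr hm] at hobs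
      have hfil : ds.filter (fun d => t ≤ d) = ds.filter (fun d => t + 1 ≤ d) := by
        apply List.filter_congr
        intro d hd
        have hne : d ≠ t := fun h => hnot (h ▸ hd)
        simp only [decide_eq_decide]
        omega
      have hmax : max 0 (E - t + 1) = max 0 (E - (t + 1) + 1) + 1 := by omega
      rw [hrec, hfil, hmax, foldMin_shift]
  · simp only [hE, dite_false]
    have hmax : max 0 (E - t + 1) = 0 := by omega
    rw [hmax]
    have h1 := foldMin_le_init t (ds.filter (fun d => t ≤ d)) 0
    have h2 := foldMin_nonneg t (ds.filter (fun d => t ≤ d))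
      (fun d hd => by simpa using (List.mem_filter.mp hd).2) 0 le_rfl
    omega
termination_by (E + 1 - t).toNat
decreasing_by omega

lemma foldB_eq (q0 q1 di dj : Int) (l : List (List Int)) : ∀ init,
    l.foldl (fun best o =>
      match o with
      | [a, b] =>
        if 0 < (a - q0) * di ∧ (a - q0) * di = (b - q1) * dj then min best ((a - q0) * di - 1)
        else best
      | _ => best) init
    = (l.filterMap (matchD q0 q1 di dj)).foldl (fun b d => min b (d - 1)) init := by
  induction l with
  | nil => intro init; rfl
  | cons o l ih =>
    intro init
    match o with
    | [] => simpa [matchD] using ih init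
    | [a] => simpa [matchD] using ih init
    | [a, b] =>
      by_cases h : 0 < (a - q0) * di ∧ (a - q0) * di = (b - q1) * dj
      · have hl : ([a, b] :: l).foldl (fun best o =>
            match o with
            | [a, b] =>
              if 0 < (a - q0) * di ∧ (a - q0) * di = (b - q1) * dj then min best ((a - q0) * di - 1)
              else best
            | _ => best) init
            = l.foldl (fun best o =>
            match o with
            | [a, b] =>
              if 0 < (a - q0) * di ∧ (a - q0) * di = (b - q1) * dj then min best ((a - q0) * di - 1)
              else best
            | _ => best) (min init ((a - q0) * di - 1)) := by
          simp only [List.foldl_cons, if_pos h]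
        have hr : ([a, b] :: l).filterMap (matchD q0 q1 di dj)
            = (a - q0) * di :: l.filterMap (matchD q0 q1 di dj) := by
          rw [List.filterMap_cons]
          simp only [matchD]
          rw [if_pos h]
        rw [hl, hr, List.foldl_cons]
        exact ih _
      · have hl : ([a, b] :: l).foldl (fun best o =>
            match o with
            | [a, b] =>
              if 0 < (a - q0) * di ∧ (a - q0) * di = (b - q1) * dj then min best ((a - q0) * di - 1)
              else best
            | _ => best) init
            = l.foldl (fun best o =>
            match o with
            | [a, b] =>
              if 0 < (a - q0) * di ∧ (a - q0) * di = (b - q1) * dj then min best ((a - q0) * di - 1)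
              else best
            | _ => best) init := by
          simp only [List.foldl_cons, if_neg h]
        have hr : ([a, b] :: l).filterMap (matchD q0 q1 di dj)
            = l.filterMap (matchD q0 q1 di dj) := by
          rw [List.filterMap_cons]
          simp only [matchD]
          rw [if_neg h]
        rw [hl, hr]
        exact ih init
    | a :: b :: c :: rest => simpa [matchD] using ih init

lemma matchD_pos (q0 q1 di dj : Int) (obstacles : List (List Int)) :
    ∀ d ∈ obstacles.filterMap (matchD q0 q1 di dj), 0 < d := by
  intro d hd
  obtain ⟨o, _, ho⟩ := List.mem_filterMap.mp hd
  match o with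
  | [] => simp [matchD] at ho
  | [a] => simp [matchD] at ho
  | [a, b] =>
    by_cases h : 0 < (a - q0) * di ∧ (a - q0) * di = (b - q1) * dj
    · simp [matchD, h] at ho; omega
    · simp [matchD, h] at ho
  | a :: b :: c :: rest => simp [matchD] at ho

lemma mem_ds_iff (q0 q1 di dj : Int) (hdi : di * di = 1) (hdj : dj * dj = 1)
    (obstacles : List (List Int)) (d : Int) (hd : 0 < d) :
    d ∈ obstacles.filterMap (matchD q0 q1 di dj) ↔ [q0 + d * di, q1 + d * dj] ∈ obstacles := by
  rw [List.mem_filterMap]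
  constructor
  · rintro ⟨o, hmem, ho⟩
    match o with
    | [] => simp [matchD] at ho
    | [a] => simp [matchD] at ho
    | [a, b] =>
      by_cases h : 0 < (a - q0) * di ∧ (a - q0) * di = (b - q1) * dj
      · simp only [matchD] at ho
        rw [if_pos h] at ho
        injection ho with ho
        have hbd : (b - q1) * dj = d := by rw [← h.2, ho]
        have ha : a - q0 = d * di := by
          have h1 : (a - q0) * di * di = d * di := by rw [ho]
          rw [mul_assoc, hdi, mul_one] at h1
          linarith
        have hb : b - q1 = d * dj := by
          have h2 : (b - q1) * dj * dj = d * dj := by rw [hbd]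
          rw [mul_assoc, hdj, mul_one] at h2
          linarith
        have : [a, b] = [q0 + d * di, q1 + d * dj] := by
          simp only [List.cons.injEq, and_true]
          constructor <;> linarith
        rwa [← this]
      · simp [matchD, h] at ho
    | a :: b :: c :: rest => simp [matchD] at ho
  · intro hmem
    refine ⟨[q0 + d * di, q1 + d * dj], hmem, ?_⟩
    have e1 : (q0 + d * di - q0) * di = d := by
      have : (q0 + d * di - q0) * di = d * (di * di) := by ring
      rw [this, hdi, mul_one]
    have e2 : (q1 + d * dj - q1) * dj = d := by
      have : (q1 + d * dj - q1) * dj = d * (dj * dj) := by ring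
      rw [this, hdj, mul_one]
    simp only [matchD, e1, e2]
    simp [hd]

theorem loopTR_len (obstacles : List (List Int)) (size q0 q1 t : Int) (acc : List (List Int)) :
    ((pvLoopTR obstacles size (q0 - t) (q1 + t) acc).length : Int)
      = (acc.length : Int)
        + gWalk (fun d => decide ([q0 - d, q1 + d] ∈ obstacles)) (min q0 (size - 1 - q1)) t := by
  rw [pvLoopTR, gWalk]
  by_cases hc : 0 ≤ q0 - t ∧ q1 + t < size
  · have hE : t ≤ min q0 (size - 1 - q1) := by omega
    rw [dif_pos hc, dif_pos hE]
    by_cases hmem : [q0 - t, q1 + t] ∈ obstacles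
    · simp [hmem]
    · have e1 : q0 - t - 1 = q0 - (t + 1) := by ring
      have e2 : q1 + t + 1 = q1 + (t + 1) := by ring
      simp only [hmem, if_false, decide_false, Bool.false_eq_true, e1, e2]
      rw [loopTR_len obstacles size q0 q1 (t + 1) (acc ++ [[q0 - t, q1 + t]])]
      simp
      ring
  · rw [dif_neg hc, dif_neg (by omega : ¬ t ≤ min q0 (size - 1 - q1))]
    simp
termination_by (q0 - t + 1).toNat
decreasing_by omega

theorem loopTL_len (obstacles : List (List Int)) (q0 q1 t : Int) (acc : List (List Int)) :
    ((pvLoopTL obstacles (q0 - t) (q1 - t) acc).length : Int)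
      = (acc.length : Int)
        + gWalk (fun d => decide ([q0 - d, q1 - d] ∈ obstacles)) (min q0 q1) t := by
  rw [pvLoopTL, gWalk]
  by_cases hc : 0 ≤ q0 - t ∧ 0 ≤ q1 - t
  · have hE : t ≤ min q0 q1 := by omega
    rw [dif_pos hc, dif_pos hE]
    by_cases hmem : [q0 - t, q1 - t] ∈ obstacles
    · simp [hmem]
    · have e1 : q0 - t - 1 = q0 - (t + 1) := by ring
      have e2 : q1 - t - 1 = q1 - (t + 1) := by ring
      simp only [hmem, if_false, decide_false, Bool.false_eq_true, e1, e2]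
      rw [loopTL_len obstacles q0 q1 (t + 1) (acc ++ [[q0 - t, q1 - t]])]
      simp
      ring
  · rw [dif_neg hc, dif_neg (by omega : ¬ t ≤ min q0 q1)]
    simp
termination_by (q0 - t + 1).toNat
decreasing_by omega

theorem loopBR_len (obstacles : List (List Int)) (size q0 q1 t : Int) (acc : List (List Int)) :
    ((pvLoopBR obstacles size (q0 + t) (q1 + t) acc).length : Int)
      = (acc.length : Int)
        + gWalk (fun d => decide ([q0 + d, q1 + d] ∈ obstacles)) (min (size - 1 - q0) (size - 1 - q1)) t := by
  rw [pvLoopBR, gWalk]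
  by_cases hc : q0 + t < size ∧ q1 + t < size
  · have hE : t ≤ min (size - 1 - q0) (size - 1 - q1) := by omega
    rw [dif_pos hc, dif_pos hE]
    by_cases hmem : [q0 + t, q1 + t] ∈ obstacles
    · simp [hmem]
    · have e1 : q0 + t + 1 = q0 + (t + 1) := by ring
      have e2 : q1 + t + 1 = q1 + (t + 1) := by ring
      simp only [hmem, if_false, decide_false, Bool.false_eq_true, e1, e2]
      rw [loopBR_len obstacles size q0 q1 (t + 1) (acc ++ [[q0 + t, q1 + t]])]
      simp
      ring
  · rw [dif_neg hc, dif_neg (by omega : ¬ t ≤ min (size - 1 - q0) (size - 1 - q1))]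
    simp
termination_by (size - 1 - q0 - t + 1).toNat
decreasing_by omega

theorem loopBL_len (obstacles : List (List Int)) (size q0 q1 t : Int) (acc : List (List Int)) :
    ((pvLoopBL obstacles size (q0 + t) (q1 - t) acc).length : Int)
      = (acc.length : Int)
        + gWalk (fun d => decide ([q0 + d, q1 - d] ∈ obstacles)) (min (size - 1 - q0) q1) t := by
  rw [pvLoopBL, gWalk]
  by_cases hc : q0 + t < size ∧ 0 ≤ q1 - t
  · have hE : t ≤ min (size - 1 - q0) q1 := by omega
    rw [dif_pos hc, dif_pos hE]
    by_cases hmem : [q0 + t, q1 - t] ∈ obstacles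
    · simp [hmem]
    · have e1 : q0 + t + 1 = q0 + (t + 1) := by ring
      have e2 : q1 - t - 1 = q1 - (t + 1) := by ring
      simp only [hmem, if_false, decide_false, Bool.false_eq_true, e1, e2]
      rw [loopBL_len obstacles size q0 q1 (t + 1) (acc ++ [[q0 + t, q1 - t]])]
      simp
      ring
  · rw [dif_neg hc, dif_neg (by omega : ¬ t ≤ min (size - 1 - q0) q1)]
    simp
termination_by (size - 1 - q0 - t + 1).toNat
decreasing_by omega

lemma filter_one_le (q0 q1 di dj : Int) (obstacles : List (List Int)) :
    (obstacles.filterMap (matchD q0 q1 di dj)).filter (fun d => (1:Int) ≤ d)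
      = obstacles.filterMap (matchD q0 q1 di dj) := by
  apply List.filter_eq_self.mpr
  intro d hd
  have := matchD_pos q0 q1 di dj obstacles d hd
  simpa using by omega

lemma case_tr (q0 q1 : Int) (rest : List Int) (obstacles : List (List Int)) (size : Int) :
    find_diagonal (q0 :: q1 :: rest) obstacles size "tr"
      = find_diagonal_alt (q0 :: q1 :: rest) obstacles size "tr" := by
  unfold find_diagonal find_diagonal_alt
  simp only [pysem, beq_self_eq_true, String.reduceBEq, Bool.false_eq_true, if_false, if_true, show PySem.List.pyGetD (q0::q1::rest) 0 0 = q0 by simp [pysem],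
    show PySem.List.pyGetD (q0::q1::rest) 1 0 = q1 by simp [pysem]]
  rw [if_neg (by norm_num : ¬ (1:Int) = -1), foldB_eq q0 q1 (-1) 1 obstacles]
  have hG := gWalk_eq (fun d => decide ([q0 - d, q1 + d] ∈ obstacles)) (min q0 (size - 1 - q1))
      (obstacles.filterMap (matchD q0 q1 (-1) 1)) (matchD_pos q0 q1 (-1) 1 obstacles)
      (fun d hd => by
        rw [mem_ds_iff q0 q1 (-1) 1 (by ring) (by ring) obstacles d hd]
        have e1 : q0 + d * (-1) = q0 - d := by ring
        have e2 : q1 + d * 1 = q1 + d := by ring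
        rw [e1, e2]
        simp) 1 le_rfl
  rw [filter_one_le] at hG
  have hmax : min q0 (size - 1 - q1) - 1 + 1 = min q0 (size - 1 - q1) := by ring
  rw [hmax] at hG
  have hA := loopTR_len obstacles size q0 q1 1 []
  simp only [List.length_nil, Int.natCast_zero, zero_add] at hA
  rw [hA, hG]

lemma case_tl (q0 q1 : Int) (rest : List Int) (obstacles : List (List Int)) (size : Int) :
    find_diagonal (q0 :: q1 :: rest) obstacles size "tl"
      = find_diagonal_alt (q0 :: q1 :: rest) obstacles size "tl" := by
  unfold find_diagonal find_diagonal_alt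
  simp only [pysem, beq_self_eq_true, String.reduceBEq, Bool.false_eq_true, if_false, if_true, show PySem.List.pyGetD (q0::q1::rest) 0 0 = q0 by simp [pysem],
    show PySem.List.pyGetD (q0::q1::rest) 1 0 = q1 by simp [pysem]]
  rw [foldB_eq q0 q1 (-1) (-1) obstacles]
  have hG := gWalk_eq (fun d => decide ([q0 - d, q1 - d] ∈ obstacles)) (min q0 q1)
      (obstacles.filterMap (matchD q0 q1 (-1) (-1))) (matchD_pos q0 q1 (-1) (-1) obstacles)
      (fun d hd => by
        rw [mem_ds_iff q0 q1 (-1) (-1) (by ring) (by ring) obstacles d hd]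
        have e1 : q0 + d * (-1) = q0 - d := by ring
        have e2 : q1 + d * (-1) = q1 - d := by ring
        rw [e1, e2]
        simp) 1 le_rfl
  rw [filter_one_le] at hG
  have hmax : min q0 q1 - 1 + 1 = min q0 q1 := by ring
  rw [hmax] at hG
  have hA := loopTL_len obstacles q0 q1 1 []
  simp only [List.length_nil, Int.natCast_zero, zero_add] at hA
  rw [hA, hG]

lemma case_br (q0 q1 : Int) (rest : List Int) (obstacles : List (List Int)) (size : Int) :
    find_diagonal (q0 :: q1 :: rest) obstacles size "br"
      = find_diagonal_alt (q0 :: q1 :: rest) obstacles size "br" := by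
  unfold find_diagonal find_diagonal_alt
  simp only [pysem, beq_self_eq_true, String.reduceBEq, Bool.false_eq_true, if_false, if_true, show PySem.List.pyGetD (q0::q1::rest) 0 0 = q0 by simp [pysem],
    show PySem.List.pyGetD (q0::q1::rest) 1 0 = q1 by simp [pysem]]
  simp only [if_neg (by norm_num : ¬ (1:Int) = -1)]
  rw [foldB_eq q0 q1 1 1 obstacles]
  have hG := gWalk_eq (fun d => decide ([q0 + d, q1 + d] ∈ obstacles)) (min (size - 1 - q0) (size - 1 - q1))
      (obstacles.filterMap (matchD q0 q1 1 1)) (matchD_pos q0 q1 1 1 obstacles)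
      (fun d hd => by
        rw [mem_ds_iff q0 q1 1 1 (by ring) (by ring) obstacles d hd]
        have e1 : q0 + d * 1 = q0 + d := by ring
        have e2 : q1 + d * 1 = q1 + d := by ring
        rw [e1, e2]
        simp) 1 le_rfl
  rw [filter_one_le] at hG
  have hmax : min (size - 1 - q0) (size - 1 - q1) - 1 + 1 = min (size - 1 - q0) (size - 1 - q1) := by ring
  rw [hmax] at hG
  have hA := loopBR_len obstacles size q0 q1 1 []
  simp only [List.length_nil, Int.natCast_zero, zero_add] at hA
  rw [hA, hG]

lemma case_bl (q0 q1 : Int) (rest : List Int) (obstacles : List (List Int)) (size : Int) :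
    find_diagonal (q0 :: q1 :: rest) obstacles size "bl"
      = find_diagonal_alt (q0 :: q1 :: rest) obstacles size "bl" := by
  unfold find_diagonal find_diagonal_alt
  simp only [pysem, beq_self_eq_true, String.reduceBEq, Bool.false_eq_true, if_false, if_true, show PySem.List.pyGetD (q0::q1::rest) 0 0 = q0 by simp [pysem],
    show PySem.List.pyGetD (q0::q1::rest) 1 0 = q1 by simp [pysem]]
  simp only [if_neg (by norm_num : ¬ (1:Int) = -1)]
  rw [foldB_eq q0 q1 1 (-1) obstacles]
  have hG := gWalk_eq (fun d => decide ([q0 + d, q1 - d] ∈ obstacles)) (min (size - 1 - q0) q1)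
      (obstacles.filterMap (matchD q0 q1 1 (-1))) (matchD_pos q0 q1 1 (-1) obstacles)
      (fun d hd => by
        rw [mem_ds_iff q0 q1 1 (-1) (by ring) (by ring) obstacles d hd]
        have e1 : q0 + d * 1 = q0 + d := by ring
        have e2 : q1 + d * (-1) = q1 - d := by ring
        rw [e1, e2]
        simp) 1 le_rfl
  rw [filter_one_le] at hG
  have hmax : min (size - 1 - q0) q1 - 1 + 1 = min (size - 1 - q0) q1 := by ring
  rw [hmax] at hG
  have hA := loopBL_len obstacles size q0 q1 1 []
  simp only [List.length_nil, Int.natCast_zero, zero_add] at hA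
  rw [hA, hG]

lemma pvQueenShape (queen : List Int) (h : 2 ≤ queen.length) :
    ∃ q0 q1 r, queen = q0 :: q1 :: r := by
  match queen with
  | q0 :: q1 :: r => exact ⟨q0, q1, r, rfl⟩
  | [] => simp at h
  | [q] => simp at h

-- ===== VERDICT (by name: the statement is the Claim_ definition above) =====
theorem find_diagonal_spec : Claim_equal_find_diagonal := by
  intro queen obstacles size pos _hdom hpre
  unfold Spec_find_diagonal
  by_cases h1 : pos = "tr"
  · subst h1
    obtain ⟨q0, q1, r, rfl⟩ := pvQueenShape queen (hpre (Or.inl rfl))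
    exact case_tr q0 q1 r obstacles size
  by_cases h2 : pos = "tl"
  · subst h2
    obtain ⟨q0, q1, r, rfl⟩ := pvQueenShape queen (hpre (Or.inr (Or.inl rfl)))
    exact case_tl q0 q1 r obstacles size
  by_cases h3 : pos = "br"
  · subst h3
    obtain ⟨q0, q1, r, rfl⟩ := pvQueenShape queen (hpre (Or.inr (Or.inr (Or.inl rfl))))
    exact case_br q0 q1 r obstacles size
  by_cases h4 : pos = "bl"
  · subst h4
    obtain ⟨q0, q1, r, rfl⟩ := pvQueenShape queen (hpre (Or.inr (Or.inr (Or.inr rfl))))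
    exact case_bl q0 q1 r obstacles size
  unfold find_diagonal find_diagonal_alt
  rw [show (pos == "tr") = false by simpa using h1, show (pos == "tl") = false by simpa using h2,
    show (pos == "br") = false by simpa using h3, show (pos == "bl") = false by simpa using h4]
  simp
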